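-- pv_equiv track=rewrite | github.com/tnsrc/sample_sql_analysis | adaptive_chunked_analyzer.py | _find_nested_structure_subdivisions
-- ===== SOURCE A (Python) =====
-- from typing import List, Dict, Any, Tuple, Optional, Set
--
-- def _find_nested_structure_subdivisions(chunk_lines: List[Dict]) -> List[int]:
--     """Find subdivision points based on nested control structures"""
--     points = []
--     nesting_level = 0
--
--     for i, line_data in enumerate(chunk_lines):
--         nesting_change = line_data.get('nesting_change', 0)
--         nesting_level += nesting_change
--
--         # Add subdivision point when we return to a lower nesting level
--         if nesting_change < 0 and nesting_level <= 1:
--             points.append(i + 1)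
--
--     return points
-- ===== SOURCE B (Python) =====
-- def _find_nested_structure_subdivisions(chunk_lines):
--     """Find subdivision points based on nested control structures.
--
--     Divide-and-conquer: split the lines at the midpoint, solve each half
--     recursively (each call returns its points and its total nesting change,
--     so the right half is solved with base level = base + left half's total),
--     and concatenate the point lists.
--     """
--     changes = [ld.get('nesting_change', 0) for ld in chunk_lines]
--
--     def solve(seg, start, base):
--         # returns (subdivision points of seg, total change of seg)
--         n = len(seg)
--         if n == 0:
--             return [], 0
--         if n == 1:
--             c = seg[0]
--             return ([start + 1] if c < 0 and base + c <= 1 else []), c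
--         mid = n // 2
--         lp, ls = solve(seg[:mid], start, base)
--         rp, rs = solve(seg[mid:], start + mid, base + ls)
--         return lp + rp, ls + rs
--
--     return solve(changes, 0, 0)[0]
-- ===== Notes on version B (the rewrite author's own statement) =====
-- stated objective: alternative
-- what changed: Replaces A's single left-to-right accumulate-and-emit scan with a divide-and-conquer recursion: the change list is split at the midpoint, each half is solved recursively (each call returns its points and its total nesting change, so the right half starts from base level = base + left total), and the point lists are concatenated.
import Mathlib
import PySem

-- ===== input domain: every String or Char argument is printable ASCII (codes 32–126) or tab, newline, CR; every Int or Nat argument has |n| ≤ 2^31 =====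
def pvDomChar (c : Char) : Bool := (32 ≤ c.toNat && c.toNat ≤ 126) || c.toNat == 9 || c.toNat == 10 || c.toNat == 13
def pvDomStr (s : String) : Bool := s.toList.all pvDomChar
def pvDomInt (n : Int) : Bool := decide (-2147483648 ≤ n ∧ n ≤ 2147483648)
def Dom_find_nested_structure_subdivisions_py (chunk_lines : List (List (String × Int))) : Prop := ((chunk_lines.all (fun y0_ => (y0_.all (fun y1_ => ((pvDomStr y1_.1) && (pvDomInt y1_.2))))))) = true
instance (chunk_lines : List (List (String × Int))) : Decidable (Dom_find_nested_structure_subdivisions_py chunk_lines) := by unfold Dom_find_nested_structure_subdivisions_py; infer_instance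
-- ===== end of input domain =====

-- B replaces A's single accumulate-and-emit scan by a divide-and-conquer recursion:
-- split at the midpoint, solve each half (carrying the left half's total change as
-- the right half's base level), concatenate; an 'alternative', not faster.


-- ===== PORT A =====
-- for i, line_data in enumerate(chunk_lines): accumulate nesting_level, append i+1 when
-- nesting_change < 0 and nesting_level <= 1; state = (points, nesting_level)
def find_nested_structure_subdivisions_py (chunk_lines : List (List (String × Int))) : List Int :=
  ((PySem.List.enumerate chunk_lines 0).foldl
    (fun (st : List Int × Int) p =>
      let nesting_change := PySem.Dict.getD (PySem.Dict.ofList p.2) "nesting_change" 0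
      let nesting_level := st.2 + nesting_change
      (if nesting_change < 0 ∧ nesting_level ≤ 1 then st.1 ++ [p.1 + 1] else st.1,
       nesting_level))
    ([], 0)).1

-- ===== PORT B =====
-- Source B's solve(seg, start, base): divide and conquer on the change list.
-- fuel (initially the list length, always ≥ the segment length) only makes the
-- recursion structural; the 0-fuel branch is never reached.
def pvSolve (fuel : Nat) (seg : List Int) (start base : Int) : List Int × Int :=
  match fuel with
  | 0 => ([], 0)
  | fuel + 1 =>
    if seg.length = 0 then ([], 0)
    else if seg.length = 1 then
      let c := seg.headD 0      -- seg[0] on a nonempty list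
      (if c < 0 ∧ base + c ≤ 1 then [start + 1] else [], c)
    else
      let mid := seg.length / 2
      let lres := pvSolve fuel (seg.take mid) start base
      let rres := pvSolve fuel (seg.drop mid) (start + (mid : Int)) (base + lres.2)
      (lres.1 ++ rres.1, lres.2 + rres.2)

def find_nested_structure_subdivisions_py_alt (chunk_lines : List (List (String × Int))) : List Int :=
  let changes := chunk_lines.map (fun ld => PySem.Dict.getD (PySem.Dict.ofList ld) "nesting_change" 0)
  (pvSolve changes.length changes 0 0).1

-- ===== PRECONDITION & SPEC =====
def Spec_find_nested_structure_subdivisions_py (chunk_lines : List (List (String × Int))) (out : List Int) : Prop := out = find_nested_structure_subdivisions_py_alt chunk_lines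
instance (chunk_lines : List (List (String × Int))) (out : List Int) : Decidable (Spec_find_nested_structure_subdivisions_py chunk_lines out) := by unfold Spec_find_nested_structure_subdivisions_py; infer_instance

-- ===== CLAIM (what is proved, stated in full; the proofs are below) =====
def Claim_equal_find_nested_structure_subdivisions_py : Prop := ∀ (chunk_lines : List (List (String × Int))), Dom_find_nested_structure_subdivisions_py chunk_lines → Spec_find_nested_structure_subdivisions_py chunk_lines (find_nested_structure_subdivisions_py chunk_lines)

-- ===== LEMMAS AND PROOFS =====
-- running levels of a change list from base level `s` (proof-only table)
def pvLevels (s : Int) : List Int → List Int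
  | [] => []
  | c :: cs => (s + c) :: pvLevels (s + c) cs

-- canonical description of the subdivision points of a change list
def pvSpec (seg : List Int) (start base : Int) : List Int :=
  (PySem.List.enumerate (seg.zip (pvLevels base seg)) start).filterMap
    (fun p => if p.2.1 < 0 ∧ p.2.2 ≤ 1 then some (p.1 + 1) else none)

theorem pvLevels_length (s : Int) (l : List Int) : (pvLevels s l).length = l.length := by
  induction l generalizing s with
  | nil => rfl
  | cons c cs ih => simp [pvLevels, ih]

theorem pvLevels_append (b : Int) (l r : List Int) :
    pvLevels b (l ++ r) = pvLevels b l ++ pvLevels (b + l.sum) r := by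
  induction l generalizing b with
  | nil => simp [pvLevels]
  | cons c cs ih =>
    simp only [List.cons_append, pvLevels, ih, List.sum_cons]
    rw [show b + c + cs.sum = b + (c + cs.sum) by ring]

theorem pvSpec_append (l r : List Int) (start base : Int) :
    pvSpec (l ++ r) start base
      = pvSpec l start base ++ pvSpec r (start + l.length) (base + l.sum) := by
  unfold pvSpec
  rw [pvLevels_append,
      List.zip_append (by simp [pvLevels_length]),
      PySem.List.enumerate_append, List.filterMap_append]
  simp [List.length_zip, pvLevels_length]

theorem pvSolve_eq (fuel : Nat) (seg : List Int) (start base : Int)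
    (hfuel : seg.length ≤ fuel) :
    pvSolve fuel seg start base = (pvSpec seg start base, seg.sum) := by
  induction fuel generalizing seg start base with
  | zero =>
    rcases List.eq_nil_of_length_eq_zero (Nat.le_zero.mp hfuel) with rfl
    simp [pvSolve, pvSpec, pvLevels]
  | succ fuel ih =>
    rw [pvSolve]
    by_cases h0 : seg.length = 0
    · rcases List.eq_nil_of_length_eq_zero h0 with rfl
      simp [pvSpec, pvLevels]
    · by_cases h1 : seg.length = 1
      · rcases List.length_eq_one_iff.mp h1 with ⟨c, rfl⟩
        simp [h1, pvSpec, pvLevels, PySem.List.enumerate_cons, PySem.List.enumerate,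
          List.filterMap_cons]
        split_ifs with h <;> simp
      · simp only [h0, h1, if_false]
        have hsplit : seg = seg.take (seg.length / 2) ++ seg.drop (seg.length / 2) :=
          (List.take_append_drop _ _).symm
        rw [ih _ _ _ (by simp; omega), ih _ _ _ (by simp; omega)]
        simp only [Prod.mk.injEq]
        have hl : (List.take (seg.length / 2) seg).length = seg.length / 2 := by
          simp [List.length_take]; omega
        refine ⟨?_, ?_⟩
        · conv_rhs => rw [hsplit]
          rw [pvSpec_append, hl]
        · conv_rhs => rw [hsplit]
          rw [List.sum_append]

-- Loop invariant for A: the fold from (acc, lvl) over the suffix enumerated from i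
-- is acc followed by the canonical points of that suffix's change list.
theorem pv_key (ds : List (List (String × Int))) (i lvl : Int) (acc : List Int) :
    ((PySem.List.enumerate ds i).foldl
      (fun (st : List Int × Int) p =>
        let nesting_change := PySem.Dict.getD (PySem.Dict.ofList p.2) "nesting_change" 0
        let nesting_level := st.2 + nesting_change
        (if nesting_change < 0 ∧ nesting_level ≤ 1 then st.1 ++ [p.1 + 1] else st.1,
         nesting_level)) (acc, lvl)).1
    = acc ++ pvSpec (ds.map (fun ld => PySem.Dict.getD (PySem.Dict.ofList ld) "nesting_change" 0)) i lvl := by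
  induction ds generalizing i lvl acc with
  | nil => simp [PySem.List.enumerate, pvSpec, pvLevels]
  | cons d ds ih =>
    simp only [PySem.List.enumerate_cons, List.foldl_cons, List.map_cons, pvSpec, pvLevels,
      List.zip_cons_cons, List.filterMap_cons]
    rw [ih]
    by_cases h : PySem.Dict.getD (PySem.Dict.ofList d) "nesting_change" 0 < 0 ∧
        lvl + PySem.Dict.getD (PySem.Dict.ofList d) "nesting_change" 0 ≤ 1
    · simp [pvSpec, h, List.append_assoc]
    · simp [pvSpec, h]

-- ===== VERDICT (by name: the statement is the Claim_ definition above) =====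
theorem find_nested_structure_subdivisions_py_spec : Claim_equal_find_nested_structure_subdivisions_py := by
  intro chunk_lines _
  show _ = _
  unfold find_nested_structure_subdivisions_py find_nested_structure_subdivisions_py_alt
  simp only
  rw [pvSolve_eq _ _ _ _ (le_refl _)]
  simpa using pv_key chunk_lines 0 0 []
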